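-- pv_equiv track=rewrite | github.com/jimorie/advent-of-code | 2020/day14b.py | float_mask
-- ===== SOURCE A (Python) =====
-- def float_mask(mask):
--     if "X" in mask:
--         prefix, mask = mask.split("X", 1)
--         for suffix in float_mask(mask):
--             yield prefix + "0" + suffix
--             yield prefix + "1" + suffix
--     else:
--         yield mask
-- ===== SOURCE B (Python) =====
-- def float_mask(mask):
--     k = mask.count("X")
--     for i in range(2 ** k):
--         out = []
--         bits = i
--         for c in mask:
--             if c == "X":
--                 out.append(str(bits & 1))
--                 bits >>= 1
--             else:
--                 out.append(c)
--         yield "".join(out)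
-- ===== Notes on version B (the rewrite author's own statement) =====
-- stated objective: alternative
-- what changed: Replaced the recursive split-at-first-X generator with an iterative binary counter: B counts the k X positions and for each i in range(2**k) builds the string in one scan, feeding bit (i>>j)&1 to the j-th X (first X = LSB).
import Mathlib
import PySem

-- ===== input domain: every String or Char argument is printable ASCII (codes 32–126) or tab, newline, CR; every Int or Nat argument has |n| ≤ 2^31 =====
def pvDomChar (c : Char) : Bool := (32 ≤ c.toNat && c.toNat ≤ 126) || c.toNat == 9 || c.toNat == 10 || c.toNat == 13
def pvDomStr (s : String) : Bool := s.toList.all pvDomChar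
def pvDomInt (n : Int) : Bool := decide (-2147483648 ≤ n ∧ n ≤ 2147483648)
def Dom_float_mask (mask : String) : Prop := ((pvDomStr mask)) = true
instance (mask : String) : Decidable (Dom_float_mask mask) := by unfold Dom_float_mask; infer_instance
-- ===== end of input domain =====

-- B replaces A's recursive split-at-first-X expansion by an iterative binary-counter enumeration (same output order); return-value equivalence (both Pythons are generators, compared as the lists they yield).

-- ===== PORT A =====
-- termination helper for floatMaskA (cited in decreasing_by)
theorem pv_dropWhile_tail_lt : ∀ (cs : List Char), 'X' ∈ cs →
    ((cs.dropWhile (· ≠ 'X')).tail).length < cs.length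
  | c :: t, h => by
    by_cases hc : c = 'X'
    · subst hc; simp [List.dropWhile]
    · have ht : 'X' ∈ t := by
        rcases List.mem_cons.mp h with h' | h'
        · exact absurd h'.symm hc
        · exact h'
      have h2 := pv_dropWhile_tail_lt t ht
      have hstep : List.dropWhile (fun x => decide (x ≠ 'X')) (c :: t) =
          List.dropWhile (fun x => decide (x ≠ 'X')) t := by
        simp [List.dropWhile, hc]
      show ((List.dropWhile (fun x => decide (x ≠ 'X')) (c :: t)).tail).length < (c :: t).length
      rw [hstep]
      exact Nat.lt_succ_of_lt h2

-- A: if "X" in mask: prefix, rest = mask.split("X", 1); for suffix in float_mask(rest): yield prefix+"0"+suffix; yield prefix+"1"+suffix; else: yield mask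
def floatMaskA (cs : List Char) : List (List Char) :=
  if h : 'X' ∈ cs then
    let p := cs.takeWhile (· ≠ 'X')
    let rest := (cs.dropWhile (· ≠ 'X')).tail
    (floatMaskA rest).flatMap (fun s => [p ++ '0' :: s, p ++ '1' :: s])
  else [cs]
termination_by cs.length
decreasing_by exact pv_dropWhile_tail_lt cs h

def float_mask (mask : String) : List String :=
  (floatMaskA mask.toList).map String.ofList

-- ===== PORT B =====
-- the inner per-i scan of B: walk the mask, consuming one bit of `bits` per 'X'
-- (Python's `bits & 1` / `bits >>= 1` on the nonnegative counter are exactly % 2 / division by 2)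
def fillBits : List Char → Nat → List Char
  | [], _ => []
  | c :: rest, bits =>
    if c = 'X' then (if bits % 2 = 1 then '1' else '0') :: fillBits rest (bits / 2)
    else c :: fillBits rest bits

-- B: k = mask.count("X"); for i in range(2**k): build the string in one scan and yield it
def float_mask_alt (mask : String) : List String :=
  let k := mask.toList.count 'X'
  (List.range (2 ^ k)).map (fun i => String.ofList (fillBits mask.toList i))

-- ===== PRECONDITION & SPEC =====
def Spec_float_mask (mask : String) (out : List String) : Prop := out = float_mask_alt mask
instance (mask : String) (out : List String) : Decidable (Spec_float_mask mask out) := by unfold Spec_float_mask; infer_instance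

-- ===== CLAIM (what is proved, stated in full; the proofs are below) =====
def Claim_equal_float_mask : Prop := ∀ (mask : String), Dom_float_mask mask → Spec_float_mask mask (float_mask mask)

-- ===== LEMMAS AND PROOFS =====

-- split at the first 'X': cs = takeWhile ++ 'X' :: tail-of-dropWhile, and the prefix has no 'X'
theorem pv_split_X : ∀ (cs : List Char), 'X' ∈ cs →
    cs.takeWhile (· ≠ 'X') ++ 'X' :: (cs.dropWhile (· ≠ 'X')).tail = cs ∧
    'X' ∉ cs.takeWhile (· ≠ 'X')
  | c :: t, h => by
    by_cases hc : c = 'X'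
    · subst hc; simp [List.takeWhile, List.dropWhile]
    · have ht : 'X' ∈ t := by
        rcases List.mem_cons.mp h with h' | h'
        · exact absurd h'.symm hc
        · exact h'
      obtain ⟨e, hn⟩ := pv_split_X t ht
      have htw : List.takeWhile (fun x => decide (x ≠ 'X')) (c :: t) =
          c :: List.takeWhile (fun x => decide (x ≠ 'X')) t := by
        simp [List.takeWhile, hc]
      have hdw : List.dropWhile (fun x => decide (x ≠ 'X')) (c :: t) =
          List.dropWhile (fun x => decide (x ≠ 'X')) t := by
        simp [List.dropWhile, hc]
      refine ⟨?_, ?_⟩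
      · show List.takeWhile (fun x => decide (x ≠ 'X')) (c :: t) ++
            'X' :: (List.dropWhile (fun x => decide (x ≠ 'X')) (c :: t)).tail = c :: t
        rw [htw, hdw, List.cons_append, e]
      · show 'X' ∉ List.takeWhile (fun x => decide (x ≠ 'X')) (c :: t)
        rw [htw]
        intro hm
        rcases List.mem_cons.mp hm with h' | h'
        · exact hc h'.symm
        · exact hn h'

theorem pv_fillBits_split (p rest : List Char) (hp : 'X' ∉ p) (i : Nat) :
    fillBits (p ++ 'X' :: rest) i =
      p ++ (if i % 2 = 1 then '1' else '0') :: fillBits rest (i / 2) := by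
  induction p with
  | nil => simp [fillBits]
  | cons c t ih =>
    have hc : ¬ c = 'X' := fun h => hp (h ▸ List.mem_cons_self)
    simp only [List.cons_append, fillBits, hc, if_false]
    rw [ih (fun h => hp (List.mem_cons_of_mem _ h))]
    try rfl
    try simp

theorem pv_fillBits_noX (cs : List Char) (h : 'X' ∉ cs) (i : Nat) : fillBits cs i = cs := by
  induction cs with
  | nil => rfl
  | cons c t ih =>
    have hc : ¬ c = 'X' := fun h' => h (h' ▸ List.mem_cons_self)
    simp only [fillBits, hc, if_false]
    rw [ih (fun hm => h (List.mem_cons_of_mem _ hm))]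

theorem pv_range_double (g : Nat → List Char) (n : Nat) :
    (List.range (2 * n)).map g =
      (List.range n).flatMap (fun j => [g (2 * j), g (2 * j + 1)]) := by
  induction n with
  | zero => simp
  | succ m ih =>
    have h2 : 2 * (m + 1) = (2 * m + 1) + 1 := by ring
    rw [h2, List.range_succ, List.range_succ, List.range_succ]
    simp only [List.map_append, List.flatMap_append, ih]
    simp

theorem pv_count_split (p rest : List Char) (hp : 'X' ∉ p) :
    (p ++ 'X' :: rest).count 'X' = rest.count 'X' + 1 := by
  rw [List.count_append, List.count_cons]
  have : p.count 'X' = 0 := List.count_eq_zero.mpr hp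
  simp [this]

theorem pv_main (cs : List Char) :
    floatMaskA cs = (List.range (2 ^ cs.count 'X')).map (fillBits cs) := by
  induction hn : cs.length using Nat.strong_induction_on generalizing cs with
  | _ n ih =>
    subst hn
    by_cases h : 'X' ∈ cs
    · obtain ⟨e, hp⟩ := pv_split_X cs h
      have hlt := pv_dropWhile_tail_lt cs h
      have ihr := ih _ hlt ((cs.dropWhile (· ≠ 'X')).tail) rfl
      rw [floatMaskA]
      simp only [h, dif_pos]
      rw [ihr]
      have hcount : cs.count 'X' = ((cs.dropWhile (· ≠ 'X')).tail).count 'X' + 1 := by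
        conv_lhs => rw [← e]
        exact pv_count_split _ _ hp
      have hfill : ∀ i, fillBits cs i =
          cs.takeWhile (· ≠ 'X') ++
            (if i % 2 = 1 then '1' else '0') :: fillBits ((cs.dropWhile (· ≠ 'X')).tail) (i / 2) := by
        intro i
        conv_lhs => rw [← e]
        exact pv_fillBits_split _ _ hp i
      rw [hcount, pow_succ, mul_comm (2 ^ _) 2,
        pv_range_double (fillBits cs) (2 ^ ((cs.dropWhile (· ≠ 'X')).tail).count 'X')]
      rw [List.flatMap_map]
      apply List.flatMap_congr
      intro j _
      rw [hfill (2 * j), hfill (2 * j + 1)]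
      have h0 : (2 * j) % 2 = 0 := by omega
      have h1 : (2 * j + 1) % 2 = 1 := by omega
      have h0' : (2 * j) / 2 = j := by omega
      have h1' : (2 * j + 1) / 2 = j := by omega
      rw [h0, h1, h0', h1']
      rfl
    · rw [floatMaskA]
      simp only [h, dif_neg, not_false_iff]
      have hc0 : cs.count 'X' = 0 := List.count_eq_zero.mpr h
      rw [hc0]
      simp [pv_fillBits_noX cs h]

-- ===== VERDICT (by name: the statement is the Claim_ definition above) =====
theorem float_mask_spec : Claim_equal_float_mask := by
  intro mask _
  unfold Spec_float_mask float_mask float_mask_alt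
  rw [pv_main]
  simp [List.map_map, Function.comp]
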